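-- pv_equiv track=rewrite | github.com/XQwart/ai-social-support-assistant | backend/worker/services/parsing/pdf_extractor.py | _drop_empty_columns
-- ===== SOURCE A (Python) =====
-- def _drop_empty_columns(rows: list[list[str]]) -> list[list[str]]:
--     if not rows:
--         return rows
--
--     max_cols = max(len(row) for row in rows)
--
--     keep_indexes: list[int] = []
--
--     for col_index in range(max_cols):
--         has_value = any(
--             col_index < len(row) and row[col_index].strip() for row in rows
--         )
--
--         if has_value:
--             keep_indexes.append(col_index)
--
--     return [
--         [
--             row[col_index] if col_index < len(row) else ""
--             for col_index in keep_indexes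
--         ]
--         for row in rows
--     ]
-- ===== SOURCE B (Python) =====
-- def _drop_empty_columns(rows: list[list[str]]) -> list[list[str]]:
--     if not rows:
--         return rows
--
--     keep_indexes = sorted(
--         {i for row in rows for i, cell in enumerate(row) if cell.strip()}
--     )
--
--     return [
--         [
--             row[col_index] if col_index < len(row) else ""
--             for col_index in keep_indexes
--         ]
--         for row in rows
--     ]
-- ===== Notes on version B (the rewrite author's own statement) =====
-- stated objective: simpler
-- what changed: Replaces the column-major scan (for each column index, re-scan every row with any(...)) by a single row-major set comprehension collecting non-empty column indices, then sorts them; the rebuild is unchanged.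
import Mathlib
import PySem

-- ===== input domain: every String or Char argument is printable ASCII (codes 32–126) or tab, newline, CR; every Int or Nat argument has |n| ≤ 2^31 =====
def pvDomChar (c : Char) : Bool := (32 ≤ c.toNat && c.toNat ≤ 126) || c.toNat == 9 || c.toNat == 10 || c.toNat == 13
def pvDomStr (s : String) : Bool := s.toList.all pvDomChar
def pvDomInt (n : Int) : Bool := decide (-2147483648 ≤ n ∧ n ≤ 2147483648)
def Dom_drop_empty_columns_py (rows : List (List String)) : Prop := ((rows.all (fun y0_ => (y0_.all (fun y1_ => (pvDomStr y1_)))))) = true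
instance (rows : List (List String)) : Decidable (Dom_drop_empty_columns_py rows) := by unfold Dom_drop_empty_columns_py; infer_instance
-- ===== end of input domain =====

-- B replaces A's column-major scan by one row-major set comprehension of non-empty
-- column indices, sorted afterwards; the rebuild step is identical. Objective: simpler.

-- ===== PORT A =====
def drop_empty_columns_py (rows : List (List String)) : List (List String) :=
  if rows = [] then rows
  else
    let maxCols : Int :=
      (PySem.List.max? (rows.map (fun r => (r.length : Int))) (fun x => x)).getD 0
    let keep : List Int :=
      (PySem.List.pyRange 0 maxCols 1).filter (fun i =>
        rows.any (fun row =>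
          decide (i < (row.length : Int)) &&
            !(PySem.Str.strip (PySem.List.pyGetD row i "") == "")))
    rows.map (fun row =>
      keep.map (fun i =>
        if i < (row.length : Int) then PySem.List.pyGetD row i "" else ""))

-- ===== PORT B =====
def drop_empty_columns_py_alt (rows : List (List String)) : List (List String) :=
  if rows = [] then rows
  else
    let keep : List Int :=
      PySem.List.sorted
        (PySem.Set.ofList
          ((rows.flatMap (fun row =>
              (PySem.List.enumerate row).filter
                (fun p => !(PySem.Str.strip p.2 == "")))).map (fun p => p.1)))
        (fun x => x) false
    rows.map (fun row =>
      keep.map (fun i =>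
        if i < (row.length : Int) then PySem.List.pyGetD row i "" else ""))

-- ===== PRECONDITION & SPEC =====
def Spec_drop_empty_columns_py (rows : List (List String)) (out : List (List String)) : Prop := out = drop_empty_columns_py_alt rows
instance (rows : List (List String)) (out : List (List String)) : Decidable (Spec_drop_empty_columns_py rows out) := by unfold Spec_drop_empty_columns_py; infer_instance

-- ===== CLAIM (what is proved, stated in full; the proofs are below) =====
def Claim_equal_drop_empty_columns_py : Prop := ∀ (rows : List (List String)), Dom_drop_empty_columns_py rows → Spec_drop_empty_columns_py rows (drop_empty_columns_py rows)

-- ===== LEMMAS AND PROOFS =====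

-- A's keep list and B's keep list are equal: same members, both strictly increasing.
theorem keep_lists_eq (rows : List (List String)) (hne : rows ≠ []) :
    ((PySem.List.pyRange 0
        ((PySem.List.max? (rows.map (fun r => (r.length : Int))) (fun x => x)).getD 0)
        1).filter (fun i =>
          rows.any (fun row =>
            decide (i < (row.length : Int)) &&
              !(PySem.Str.strip (PySem.List.pyGetD row i "") == "")))) =
    PySem.List.sorted
        (PySem.Set.ofList
          ((rows.flatMap (fun row =>
              (PySem.List.enumerate row).filter
                (fun p => !(PySem.Str.strip p.2 == "")))).map (fun p => p.1)))
        (fun x => x) false := by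
  -- name the two sides
  refine Eq.symm (PySem.List.sorted_eq_of_perm_of_pairwise_lt _ _ _ ?_ ?_)
  · -- permutation: both lists are Nodup with the same members
    rw [List.perm_ext_iff_of_nodup
      ((PySem.List.nodup_pyRange_one 0 _).filter _) (PySem.Set.nodup_ofList _)]
    intro a
    -- the max bound
    obtain ⟨m, hm⟩ : ∃ m, PySem.List.max? (rows.map (fun r => (r.length : Int))) (fun x => x) = some m := by
      rcases h : PySem.List.max? (rows.map (fun r => (r.length : Int))) (fun x => x) with _ | m
      · rw [PySem.List.max?_eq_none_iff] at h
        simp [List.map_eq_nil_iff] at h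
        exact absurd h hne
      · exact ⟨m, h⟩
    have hmax : ∀ row ∈ rows, (row.length : Int) ≤ m := by
      intro row hrow
      exact PySem.List.max?_isMax hm _ (List.mem_map_of_mem hrow)
    simp only [hm, Option.getD_some, List.mem_filter, PySem.List.mem_pyRange_one,
      List.any_eq_true, PySem.Set.mem_ofList, List.mem_map, List.mem_flatMap,
      PySem.List.mem_enumerate_iff, Bool.and_eq_true, decide_eq_true_eq,
      Bool.not_eq_true', beq_eq_false_iff_ne, ne_eq]
    constructor
    · rintro ⟨⟨h0, _⟩, row, hrow, hlt, hstr⟩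
      have hk : a.toNat < row.length := by omega
      refine ⟨(a, PySem.List.pyGetD row a ""), ⟨row, hrow, ⟨a.toNat, hk, ?_⟩, by simpa using hstr⟩, rfl⟩
      rw [PySem.List.pyGetD_eq_getElem row "" h0 hlt]; simp; omega
    · rintro ⟨p, ⟨row, hrow, ⟨k, hk, rfl⟩, hps⟩, rfl⟩
      simp only [zero_add]
      have hlt : (k : Int) < (row.length : Int) := by exact_mod_cast hk
      have hget : PySem.List.pyGetD row (k : Int) "" = row[k] := by
        rw [PySem.List.pyGetD_eq_getElem row "" (by positivity) hlt]; simp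
      refine ⟨⟨by positivity, lt_of_lt_of_le hlt (hmax row hrow)⟩, row, hrow, hlt, ?_⟩
      rw [hget]
      simpa using hps
  · exact List.Pairwise.filter _ (PySem.List.pairwise_lt_pyRange_one 0 _)

theorem drop_empty_columns_py_spec : Claim_equal_drop_empty_columns_py := by
  intro rows _
  unfold Spec_drop_empty_columns_py drop_empty_columns_py drop_empty_columns_py_alt
  by_cases h : rows = []
  · simp [h]
  · simp only [h]
    rw [keep_lists_eq rows h]
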